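-- pv_equiv track=rewrite | github.com/nguyenchiemminhvu/DSA | Problems/Leetcode/HexadecimalAndHexatrigesimalConversion/solve.py | concatHex36
-- ===== SOURCE A (Python) =====
-- def concatHex36(n: int) -> str:
--     keys = "0123456789ABCDEFGHIJKLMNOPQRSTUVWXYZ"
--
--     def to_base(val: int, base: int) -> str:
--         s = ""
--         while val:
--             s += keys[(val % base)]
--             val //= base
--         return s[::-1]
--
--     return to_base(n**2, 16) + to_base(n**3, 36)
-- ===== SOURCE B (Python) =====
-- def concatHex36(n: int) -> str:
--     keys = "0123456789ABCDEFGHIJKLMNOPQRSTUVWXYZ"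
--
--     def to_base(val: int, base: int) -> str:
--         if val == 0:
--             return ""
--         # find the largest power of base not exceeding val, then peel digits
--         # most-significant-first with divmod by that power.
--         p = 1
--         while p * base <= val:
--             p *= base
--         digits = []
--         while p > 0:
--             digits.append(keys[val // p])
--             val %= p
--             p //= base
--         return "".join(digits)
--
--     return to_base(n**2, 16) + to_base(n**3, 36)
-- ===== Notes on version B (the rewrite author's own statement) =====
-- stated objective: alternative
-- what changed: to_base emits digits most-significant-first: it first finds the largest power of the base not exceeding val, then peels digits top-down by dividing by descending powers, instead of A's least-significant-first accumulation followed by string reversal.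
import Mathlib
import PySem

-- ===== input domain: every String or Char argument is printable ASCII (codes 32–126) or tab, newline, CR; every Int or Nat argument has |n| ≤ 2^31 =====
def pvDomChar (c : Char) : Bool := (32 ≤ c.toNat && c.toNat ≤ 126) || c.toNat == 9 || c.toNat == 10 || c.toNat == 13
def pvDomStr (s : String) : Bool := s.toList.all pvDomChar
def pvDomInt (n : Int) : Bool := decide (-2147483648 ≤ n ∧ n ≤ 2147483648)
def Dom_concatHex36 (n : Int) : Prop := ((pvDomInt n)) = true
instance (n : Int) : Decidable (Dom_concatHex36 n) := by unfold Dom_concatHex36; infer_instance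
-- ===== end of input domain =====

-- B's to_base emits digits most-significant-first (largest power of the base, then divmod by
-- descending powers), replacing A's least-significant-first loop plus reversal (objective:
-- alternative). Pre_ restricts to 0 ≤ n: for n < 0 the Python A loops forever in to_base(n**3, 36).


-- ===== PORT A =====
-- keys = "0123456789ABCDEFGHIJKLMNOPQRSTUVWXYZ"; keys[x] is pvDigit x (both Pythons share it)
def pvKeys : List Char := "0123456789ABCDEFGHIJKLMNOPQRSTUVWXYZ".toList
def pvDigit (x : Int) : Char := (PySem.List.pyGet? pvKeys x).getD ' '

-- A's while loop: s += keys[val % base]; val //= base; finally s[::-1].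
-- Python's loop runs while val ≠ 0 and diverges for val < 0 (and for base < 2); the
-- guard '0 < val ∧ 2 ≤ base' only totalizes the definition, it agrees with Python on
-- every input where Python's loop terminates (val ≥ 0, base ∈ {16, 36}).
def toBaseLoopA (val : Int) (base : Int) (s : List Char) : List Char :=
  if h : 0 < val ∧ 2 ≤ base then
    toBaseLoopA (PySem.Int.floordiv val base) base (s ++ [pvDigit (PySem.Int.mod val base)])
  else s.reverse
termination_by val.toNat
decreasing_by
  have hb : (0:Int) < base := by omega
  have he : PySem.Int.floordiv val base = val / base := PySem.Int.floordiv_eq_ediv_of_pos hb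
  have h1 : PySem.Int.floordiv val base < val :=
    (PySem.Int.floordiv_lt_iff_lt_mul hb).mpr (by nlinarith [h.1, h.2])
  omega

def concatHex36 (n : Int) : String :=
  String.ofList (toBaseLoopA (n ^ 2) 16 [] ++ toBaseLoopA (n ^ 3) 36 [])

-- ===== PORT B =====
-- B's first while loop: p = 1; while p * base <= val: p *= base.
-- The extra '1 ≤ p ∧ 2 ≤ base' in the guard only totalizes the definition; it holds on
-- every iteration Python actually runs (p starts at 1 and grows, base ∈ {16, 36}).
def findPowB (val : Int) (base : Int) (p : Int) : Int :=
  if h : p * base ≤ val ∧ 1 ≤ p ∧ 2 ≤ base then findPowB val base (p * base) else p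
termination_by (val - p).toNat
decreasing_by
  have h2 : p + 1 ≤ p * base := by nlinarith [h.2.1, h.2.2]
  omega

-- B's second while loop: while p > 0: digits.append(keys[val // p]); val %= p; p //= base.
-- '2 ≤ base' in the guard only totalizes (base ∈ {16, 36} on Python's calls).
def msdLoopB (val : Int) (p : Int) (base : Int) (digits : List Char) : List Char :=
  if h : 0 < p ∧ 2 ≤ base then
    msdLoopB (PySem.Int.mod val p) (PySem.Int.floordiv p base) base
      (digits ++ [pvDigit (PySem.Int.floordiv val p)])
  else digits
termination_by p.toNat
decreasing_by
  have hb : (0:Int) < base := by omega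
  have h1 : PySem.Int.floordiv p base < p :=
    (PySem.Int.floordiv_lt_iff_lt_mul hb).mpr (by nlinarith [h.1, h.2])
  have he : PySem.Int.floordiv p base = p / base := PySem.Int.floordiv_eq_ediv_of_pos hb
  have h0 : 0 ≤ p / base := Int.ediv_nonneg (by omega) (by omega)
  omega

def toBaseMainB (val : Int) (base : Int) : List Char :=
  if val = 0 then [] else msdLoopB val (findPowB val base 1) base []

def concatHex36_alt (n : Int) : String :=
  String.ofList (toBaseMainB (n ^ 2) 16 ++ toBaseMainB (n ^ 3) 36)

-- ===== PRECONDITION & SPEC =====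
-- For n < 0 the Python A loops forever in to_base(n**3, 36) (val //= 36 never reaches 0
-- from below), so A returns only for 0 ≤ n; those diverging inputs are excluded.
def Pre_concatHex36 (n : Int) : Prop := 0 ≤ n
instance (n : Int) : Decidable (Pre_concatHex36 n) := by unfold Pre_concatHex36; infer_instance
def pvWitness_concatHex36 : Int := (7)

def Spec_concatHex36 (n : Int) (out : String) : Prop := out = concatHex36_alt n
instance (n : Int) (out : String) : Decidable (Spec_concatHex36 n out) := by unfold Spec_concatHex36; infer_instance

-- ===== CLAIM (what is proved, stated in full; the proofs are below) =====
def Claim_equal_concatHex36 : Prop := ∀ (n : Int), Dom_concatHex36 n → Pre_concatHex36 n → Spec_concatHex36 n (concatHex36 n)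

-- ===== LEMMAS AND PROOFS =====

-- Canonical most-significant-first digit string of val in base (proof-land reference).
def msdRec (val : Int) (base : Int) : List Char :=
  if h : 0 < val ∧ 2 ≤ base then
    msdRec (PySem.Int.floordiv val base) base ++ [pvDigit (PySem.Int.mod val base)]
  else []
termination_by val.toNat
decreasing_by
  have hb : (0:Int) < base := by omega
  have he : PySem.Int.floordiv val base = val / base := PySem.Int.floordiv_eq_ediv_of_pos hb
  have h1 : PySem.Int.floordiv val base < val :=
    (PySem.Int.floordiv_lt_iff_lt_mul hb).mpr (by nlinarith [h.1, h.2])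
  omega

-- Fixed-width (k digits) most-significant-first expansion.
def msdPad (base : Int) : Nat → Int → List Char
  | 0, _ => []
  | (k+1), val => pvDigit (val / base ^ k) :: msdPad base k (val % base ^ k)

theorem toBaseLoopA_eq (base : Int) (k : Nat) :
    ∀ (val : Int), val.toNat ≤ k → 0 ≤ val → ∀ (s : List Char),
      toBaseLoopA val base s = msdRec val base ++ s.reverse := by
  induction k with
  | zero =>
    intro val hk h0 s
    have hv : ¬ (0 < val ∧ 2 ≤ base) := by omega
    rw [toBaseLoopA, msdRec]
    simp [hv]
  | succ k ih =>
    intro val hk h0 s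
    by_cases hv : 0 < val ∧ 2 ≤ base
    · have hb : (0:Int) < base := by omega
      have he : PySem.Int.floordiv val base = val / base := PySem.Int.floordiv_eq_ediv_of_pos hb
      have h1 : PySem.Int.floordiv val base < val :=
        (PySem.Int.floordiv_lt_iff_lt_mul hb).mpr (by nlinarith [hv.1, hv.2])
      have h2 : 0 ≤ PySem.Int.floordiv val base := he ▸ Int.ediv_nonneg (by omega) (by omega)
      rw [toBaseLoopA]
      simp only [hv]
      rw [ih _ (by omega) (by omega)]
      conv_rhs => rw [msdRec]
      simp [hv]
    · rw [toBaseLoopA, msdRec]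
      simp [hv]

-- B's digit loop started at p = base^k produces the (k+1)-wide expansion.
theorem msdLoopB_eq (base : Int) (hb : 2 ≤ base) (k : Nat) :
    ∀ (val : Int), 0 ≤ val → ∀ (acc : List Char),
      msdLoopB val (base ^ k) base acc = acc ++ msdPad base (k+1) val := by
  induction k with
  | zero =>
    intro val h0 acc
    have hg : (0:Int) < 1 ∧ 2 ≤ base := ⟨one_pos, hb⟩
    rw [msdLoopB]
    simp only [pow_zero] at *
    simp only [hg, dif_pos]
    have e1 : PySem.Int.floordiv val 1 = val := by
      rw [PySem.Int.floordiv_eq_ediv_of_pos one_pos, Int.ediv_one]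
    have e2 : PySem.Int.mod val 1 = 0 := by
      rw [PySem.Int.mod_eq_emod_of_pos one_pos, Int.emod_one]
    have e3 : PySem.Int.floordiv 1 base = 0 := by
      rw [PySem.Int.floordiv_eq_ediv_of_pos (by omega)]
      exact Int.ediv_eq_zero_of_lt (by omega) (by omega)
    rw [e1, e2, e3, msdLoopB]
    have hg2 : ¬ ((0:Int) < 0 ∧ 2 ≤ base) := by omega
    simp [hg2, msdPad]
  | succ k ih =>
    intro val h0 acc
    have hp : (0:Int) < base ^ (k+1) := pow_pos (by omega) _
    have hg : (0:Int) < base ^ (k+1) ∧ 2 ≤ base := ⟨hp, hb⟩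
    rw [msdLoopB]
    simp only [hg, dif_pos]
    have e1 : PySem.Int.floordiv val (base ^ (k+1)) = val / base ^ (k+1) :=
      PySem.Int.floordiv_eq_ediv_of_pos hp
    have e2 : PySem.Int.mod val (base ^ (k+1)) = val % base ^ (k+1) :=
      PySem.Int.mod_eq_emod_of_pos hp
    have e3 : PySem.Int.floordiv (base ^ (k+1)) base = base ^ k := by
      rw [PySem.Int.floordiv_eq_ediv_of_pos (by omega), pow_succ]
      exact Int.mul_ediv_cancel _ (by omega)
    rw [e1, e2, e3, ih _ (Int.emod_nonneg _ (by omega))]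
    simp [msdPad]

-- lower k digits of val are those of val % base^k, shifted: padding peels at the bottom too.
theorem emod_pow_ediv (base : Int) (hb : 0 < base) (k : Nat) (val : Int) (h0 : 0 ≤ val) :
    (val % base ^ (k+1)) / base = (val / base) % base ^ k := by
  have hp : (0:Int) < base ^ (k+1) := pow_pos hb _
  have hpk : (0:Int) < base ^ k := pow_pos hb _
  have hval : base ^ (k+1) * (val / base ^ (k+1)) + val % base ^ (k+1) = val :=
    Int.ediv_add_emod val (base ^ (k+1))
  set q := val / base ^ (k+1) with hq
  set r := val % base ^ (k+1) with hr
  have hr0 : 0 ≤ r := Int.emod_nonneg _ (by omega)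
  have hrlt : r < base ^ (k+1) := Int.emod_lt_of_pos _ hp
  have hv : val = r + base * (base ^ k * q) := by rw [← hval]; ring
  have hdiv : val / base = r / base + base ^ k * q := by
    rw [hv, Int.add_mul_ediv_left _ _ (by omega : base ≠ 0)]
  have hlt : r / base < base ^ k := by
    rw [Int.ediv_lt_iff_lt_mul hb]
    calc r < base ^ (k+1) := hrlt
    _ = base ^ k * base := by rw [pow_succ]
  rw [hdiv, Int.add_mul_emod_self_left, Int.emod_eq_of_lt (Int.ediv_nonneg hr0 (by omega)) hlt]

theorem msdPad_shift (base : Int) (hb : 2 ≤ base) (k : Nat) :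
    ∀ (val : Int), 0 ≤ val → val < base ^ (k+1) →
      msdPad base (k+1) val = msdPad base k (val / base) ++ [pvDigit (val % base)] := by
  induction k with
  | zero =>
    intro val h0 hlt
    rw [pow_one] at hlt
    simp [msdPad, Int.emod_eq_of_lt h0 hlt]
  | succ k ih =>
    intro val h0 hlt
    have hb0 : (0:Int) < base := by omega
    have hhead : (val / base) / base ^ k = val / base ^ (k+1) := by
      rw [Int.ediv_ediv_of_nonneg (by omega : (0:Int) ≤ base), ← pow_succ']
    have hmm : val % base ^ (k+1) % base = val % base :=
      Int.emod_emod_of_dvd val (dvd_pow_self base (Nat.succ_ne_zero k))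
    have htail := ih (val % base ^ (k+1)) (Int.emod_nonneg _ (by positivity))
      (Int.emod_lt_of_pos _ (pow_pos hb0 _))
    rw [emod_pow_ediv base hb0 k val h0] at htail
    conv_lhs => rw [msdPad]
    conv_rhs => rw [msdPad]
    rw [htail, hhead, hmm]
    simp

-- the canonical MSD string of val equals its exact-width padded expansion.
theorem msdRec_eq_msdPad (base : Int) (hb : 2 ≤ base) (k : Nat) :
    ∀ (val : Int), base ^ k ≤ val → val < base ^ (k+1) →
      msdRec val base = msdPad base (k+1) val := by
  induction k with
  | zero =>
    intro val hge hlt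
    rw [pow_zero] at hge; rw [pow_one] at hlt
    have hg : 0 < val ∧ 2 ≤ base := ⟨by omega, hb⟩
    rw [msdRec]
    simp only [hg, dif_pos]
    have e1 : PySem.Int.floordiv val base = 0 := by
      rw [PySem.Int.floordiv_eq_ediv_of_pos (by omega)]
      exact Int.ediv_eq_zero_of_lt (by omega) hlt
    have e2 : PySem.Int.mod val base = val := by
      rw [PySem.Int.mod_eq_emod_of_pos (by omega)]
      exact Int.emod_eq_of_lt (by omega) hlt
    rw [e1, e2, msdRec]
    have hg2 : ¬ ((0:Int) < 0 ∧ 2 ≤ base) := by omega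
    simp [hg2, msdPad, Int.ediv_one]
  | succ k ih =>
    intro val hge hlt
    have hb0 : (0:Int) < base := by omega
    have hp : (0:Int) < base ^ (k+1) := pow_pos hb0 _
    have h0 : (0:Int) ≤ val := le_trans (le_of_lt hp) hge
    have hg : 0 < val ∧ 2 ≤ base := ⟨by omega, hb⟩
    rw [msdRec]
    simp only [hg, dif_pos]
    have e1 : PySem.Int.floordiv val base = val / base :=
      PySem.Int.floordiv_eq_ediv_of_pos hb0
    have e2 : PySem.Int.mod val base = val % base :=
      PySem.Int.mod_eq_emod_of_pos hb0
    have hge' : base ^ k ≤ val / base := by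
      rw [Int.le_ediv_iff_mul_le hb0, ← pow_succ]; exact hge
    have hlt' : val / base < base ^ (k+1) := by
      rw [Int.ediv_lt_iff_lt_mul hb0, ← pow_succ]; exact hlt
    rw [e1, e2, ih _ hge' hlt',
      msdPad_shift base hb (k+1) val h0 hlt]
    simp

-- B's power search returns the largest power of base not exceeding val.
theorem findPowB_eq (base : Int) (hb : 2 ≤ base) (m : Nat) :
    ∀ (p val : Int) (j : Nat), (val - p).toNat ≤ m → p = base ^ j → p ≤ val →
      ∃ k : Nat, findPowB val base p = base ^ k ∧ base ^ k ≤ val ∧ val < base ^ (k+1) := by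
  induction m with
  | zero =>
    intro p val j hm hpj hpv
    have hp1 : (0:Int) < p := hpj ▸ pow_pos (by omega) j
    have hval : val = p := by omega
    have hg : ¬ (p * base ≤ val ∧ 1 ≤ p ∧ 2 ≤ base) := by
      intro ⟨h1, h2, _⟩; nlinarith
    rw [findPowB]
    simp only [hg, dif_neg, not_false_iff]
    exact ⟨j, hpj, hpj ▸ le_of_eq hval.symm, by
      rw [hval, hpj, pow_succ]; nlinarith [pow_pos (show (0:Int) < base by omega) j]⟩
  | succ m ih =>
    intro p val j hm hpj hpv
    have hp1 : (0:Int) < p := hpj ▸ pow_pos (by omega) j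
    by_cases hg : p * base ≤ val ∧ 1 ≤ p ∧ 2 ≤ base
    · rw [findPowB]
      simp only [hg, dif_pos]
      have h2 : p + 1 ≤ p * base := by nlinarith [hg.2.1]
      exact ih (p * base) val (j+1) (by omega) (by rw [hpj, pow_succ]) hg.1
    · rw [findPowB]
      simp only [hg, dif_neg, not_false_iff]
      have hlt : val < p * base := by
        by_contra hc
        exact hg ⟨by omega, by omega, hb⟩
      exact ⟨j, hpj, hpj ▸ hpv, by rw [hpj, ← pow_succ] at hlt; exact hlt⟩

-- B's to_base equals the canonical MSD string.
theorem toBaseMainB_eq (base : Int) (hb : 2 ≤ base) (val : Int) (h0 : 0 ≤ val) :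
    toBaseMainB val base = msdRec val base := by
  unfold toBaseMainB
  by_cases hz : val = 0
  · rw [msdRec]
    have hg : ¬ (0 < val ∧ 2 ≤ base) := by omega
    simp [hz, hg]
  · simp only [hz, if_neg, not_false_iff]
    obtain ⟨k, hfp, hge, hlt⟩ :=
      findPowB_eq base hb (val - 1).toNat 1 val 0 (by omega) (by rw [pow_zero]) (by omega)
    rw [hfp, msdLoopB_eq base hb k val h0 [],
      msdRec_eq_msdPad base hb k val hge hlt]
    simp

-- ===== VERDICT (by name: the statement is the Claim_ definition above) =====
theorem concatHex36_spec : Claim_equal_concatHex36 := by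
  intro n _ hn
  unfold Spec_concatHex36 concatHex36 concatHex36_alt
  have h2 : (0:Int) ≤ n ^ 2 := by positivity
  have h3 : (0:Int) ≤ n ^ 3 := pow_nonneg hn 3
  rw [toBaseLoopA_eq 16 (n ^ 2).toNat _ le_rfl h2,
      toBaseLoopA_eq 36 (n ^ 3).toNat _ le_rfl h3,
      toBaseMainB_eq 16 (by norm_num) _ h2,
      toBaseMainB_eq 36 (by norm_num) _ h3]
  simp
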